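-- pv_equiv track=rewrite | github.com/zmielko/CtrlF-TF | src/ctrlf_tf/str_utils.py | expand_kmer
-- ===== SOURCE A (Python) =====
-- from typing import List, Iterable
--
-- def expand_kmer(kmer: str) -> List[str]:
--     """Given a k-mer with wildcards as '.' returns all non-gapped sequences."""
--     results = []
--
--     def recurse_expand(fullword, result, idx):
--         if idx == len(fullword):
--             results.append(result)
--             return
--         if fullword[idx] == '.':
--             for i in ["A", "C", "G", "T"]:
--                 recurse_expand(fullword, result + i, idx + 1)
--         else:
--             recurse_expand(fullword, result + fullword[idx], idx + 1)
--     recurse_expand(kmer, '', 0)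
--     return results
-- ===== SOURCE B (Python) =====
-- from itertools import product
-- from typing import List
--
-- def expand_kmer(kmer: str) -> List[str]:
--     """Given a k-mer with wildcards as '.' returns all non-gapped sequences."""
--     choices = [["A", "C", "G", "T"] if ch == '.' else [ch] for ch in kmer]
--     return [''.join(combo) for combo in product(*choices)]
-- ===== Notes on version B (the rewrite author's own statement) =====
-- stated objective: idiomatic
-- what changed: Replaced the accumulator-passing nested recursion with per-position choice lists fed to itertools.product (C-level iteration), joining each combination.
import Mathlib
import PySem

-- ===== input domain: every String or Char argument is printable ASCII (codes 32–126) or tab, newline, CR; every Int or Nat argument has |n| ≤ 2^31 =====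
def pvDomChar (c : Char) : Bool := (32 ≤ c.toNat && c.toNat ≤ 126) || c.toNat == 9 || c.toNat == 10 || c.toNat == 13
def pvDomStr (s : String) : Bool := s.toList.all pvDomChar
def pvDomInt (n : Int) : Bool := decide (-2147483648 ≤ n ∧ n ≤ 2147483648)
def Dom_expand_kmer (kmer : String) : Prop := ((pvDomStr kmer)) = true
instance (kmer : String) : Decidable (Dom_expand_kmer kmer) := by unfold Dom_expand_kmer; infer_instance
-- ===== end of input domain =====

-- B replaces A's accumulator-passing recursion by per-position choice lists combined with a Cartesian product (idiomatic; same cost).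

-- ===== PORT A =====
-- the inner `recurse_expand`: recursion over the remaining characters, carrying the accumulated result;
-- the "for i in [A,C,G,T]" loop of sequential recursive calls appending to `results` becomes a flatMap.
def recurseExpand : List Char → String → List String
  | [], result => [result]
  | c :: rest, result =>
    if c = '.' then
      (["A", "C", "G", "T"] : List String).flatMap (fun i => recurseExpand rest (result ++ i))
    else
      recurseExpand rest (result.push c)

def expand_kmer (kmer : String) : List String := recurseExpand kmer.toList ""

-- ===== PORT B =====
-- itertools.product with the rightmost factor fastest
def pyProduct : List (List Char) → List (List Char)
  | [] => [[]]
  | cs :: rest => cs.flatMap (fun c => (pyProduct rest).map (fun t => c :: t))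

def expand_kmer_alt (kmer : String) : List String :=
  let choices := kmer.toList.map (fun ch => if ch = '.' then ['A', 'C', 'G', 'T'] else [ch])
  (pyProduct choices).map (fun combo => String.ofList combo)

-- ===== PRECONDITION & SPEC =====
def Spec_expand_kmer (kmer : String) (out : List String) : Prop := out = expand_kmer_alt kmer
instance (kmer : String) (out : List String) : Decidable (Spec_expand_kmer kmer out) := by unfold Spec_expand_kmer; infer_instance

-- ===== CLAIM (what is proved, stated in full; the proofs are below) =====
def Claim_equal_expand_kmer : Prop := ∀ (kmer : String), Dom_expand_kmer kmer → Spec_expand_kmer kmer (expand_kmer kmer)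

-- ===== LEMMAS AND PROOFS =====
theorem pv_str_cons (s : String) (c : Char) (t : List Char) :
    s ++ String.ofList (c :: t) = s.push c ++ String.ofList t := by
  apply String.ext
  simp

theorem recurseExpand_eq_product (l : List Char) (acc : String) :
    recurseExpand l acc
      = (pyProduct (l.map (fun ch => if ch = '.' then ['A', 'C', 'G', 'T'] else [ch]))).map
          (fun combo => acc ++ String.ofList combo) := by
  induction l generalizing acc with
  | nil => simp [recurseExpand, pyProduct]
  | cons c rest ih =>
    by_cases hc : c = '.'
    · subst hc
      simp [recurseExpand, pyProduct, ih, List.flatMap]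
      refine congrArg₂ HAppend.hAppend ?_ (congrArg₂ HAppend.hAppend ?_ (congrArg₂ HAppend.hAppend ?_ ?_)) <;>
        · apply List.map_congr_left
          intro t _
          apply String.ext
          simp
    · simp [recurseExpand, pyProduct, ih, pv_str_cons, hc, List.flatMap]

-- ===== VERDICT (by name: the statement is the Claim_ definition above) =====
theorem expand_kmer_spec : Claim_equal_expand_kmer := by
  intro kmer _
  unfold Spec_expand_kmer expand_kmer expand_kmer_alt
  rw [recurseExpand_eq_product]
  simp
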